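-- pv_equiv track=rewrite | github.com/aihaysteve/local-rag | src/ragling/path_mapping.py | apply_reverse
-- ===== SOURCE A (Python) =====
-- def apply_reverse(path: str, mappings: dict[str, str]) -> str:
--     """Map a container path to a host path (longest prefix match).
--
--     Args:
--         path: Container-side path.
--         mappings: {host_prefix: container_prefix} dict (same format as forward).
--
--     Returns:
--         Mapped host path, or original if no prefix matches.
--     """
--     best_container = ""
--     best_host = ""
--     for host_prefix, container_prefix in mappings.items():
--         if path.startswith(container_prefix) and len(container_prefix) > len(best_container):
--             best_container = container_prefix
--             best_host = host_prefix
--     if best_container: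
--         return best_host + path[len(best_container) :]
--     return path
-- ===== SOURCE B (Python) =====
-- def apply_reverse(path: str, mappings: dict[str, str]) -> str:
--     """Map a container path to a host path (longest prefix match).
--
--     Two-phase strategy: first compute the length of the longest matching
--     container prefix, then return the first mapping entry achieving it.
--     """
--     best = max((len(cp) for cp in mappings.values() if path.startswith(cp)), default=0)
--     if best == 0:
--         return path
--     for host_prefix, container_prefix in mappings.items():
--         if len(container_prefix) == best and path.startswith(container_prefix):
--             return host_prefix + path[best:]
--     return path
-- ===== Notes on version B (the rewrite author's own statement) =====
-- stated objective: alternative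
-- what changed: Replaces A's single-pass 'scan all entries, keep the longest matching prefix so far' accumulation with a two-phase strategy: first compute the maximal matching prefix length (max over a filtered generator), then a second scan returns the first entry achieving that length.
import Mathlib
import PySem

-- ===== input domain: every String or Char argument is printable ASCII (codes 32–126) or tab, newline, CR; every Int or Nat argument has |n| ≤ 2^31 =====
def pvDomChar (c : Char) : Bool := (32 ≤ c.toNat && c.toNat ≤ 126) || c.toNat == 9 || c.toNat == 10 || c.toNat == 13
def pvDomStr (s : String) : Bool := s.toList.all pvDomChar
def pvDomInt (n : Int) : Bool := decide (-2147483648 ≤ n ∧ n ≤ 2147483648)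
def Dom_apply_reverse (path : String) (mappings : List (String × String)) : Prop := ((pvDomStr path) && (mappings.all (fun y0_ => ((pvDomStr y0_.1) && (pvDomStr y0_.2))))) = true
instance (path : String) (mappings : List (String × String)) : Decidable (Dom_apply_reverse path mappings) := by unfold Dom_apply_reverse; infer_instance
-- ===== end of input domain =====

-- B replaces A's single-pass "scan all, keep longest" accumulation by a two-phase strategy
-- (compute the longest matching prefix length, then return the first entry achieving it);
-- objective: alternative decomposition, same asymptotic cost.


-- ===== PORT A =====
-- 'mappings' is the dict as an association list; '.items()' is read through PySem.Dict.ofList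
-- (the identity on a dict's own item list).
def apply_reverse (path : String) (mappings : List (String × String)) : String :=
  let items := (PySem.Dict.ofList mappings).items
  let best := items.foldl
    (fun (st : String × String) (p : String × String) =>
      if PySem.Str.startswith path p.2 && decide (st.1.toList.length < p.2.toList.length)
      then (p.2, p.1) else st) ("", "")
  if best.1.toList ≠ [] then
    String.ofList (best.2.toList ++ PySem.Chars.slice path.toList (some (best.1.toList.length : Int)) none)
  else path

-- ===== PORT B =====
-- the for-loop of B with its early return
def arAltFind (path : String) (best : Int) : List (String × String) → String
  | [] => path
  | p :: t =>
    if ((p.2.toList.length : Int) == best) && PySem.Str.startswith path p.2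
    then String.ofList (p.1.toList ++ PySem.Chars.slice path.toList (some best) none)
    else arAltFind path best t

def apply_reverse_alt (path : String) (mappings : List (String × String)) : String :=
  let items := (PySem.Dict.ofList mappings).items
  let lens := (items.filter (fun p => PySem.Str.startswith path p.2)).map
      (fun p => (p.2.toList.length : Int))
  let best := PySem.List.maxD lens (fun x => x) 0
  if best = 0 then path
  else arAltFind path best items

-- ===== PRECONDITION & SPEC =====
def Spec_apply_reverse (path : String) (mappings : List (String × String)) (out : String) : Prop := out = apply_reverse_alt path mappings
instance (path : String) (mappings : List (String × String)) (out : String) : Decidable (Spec_apply_reverse path mappings out) := by unfold Spec_apply_reverse; infer_instance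

-- ===== CLAIM (what is proved, stated in full; the proofs are below) =====
def Claim_equal_apply_reverse : Prop := ∀ (path : String) (mappings : List (String × String)), Dom_apply_reverse path mappings → Spec_apply_reverse path mappings (apply_reverse path mappings)

-- ===== LEMMAS AND PROOFS =====

-- running maximum of the matching prefix lengths (proof-only helper)
def runMax (path : String) (L : List (String × String)) (b : Nat) : Nat :=
  L.foldl (fun acc p => if PySem.Str.startswith path p.2 then max acc p.2.toList.length else acc) b

theorem le_runMax (path : String) (L : List (String × String)) (b : Nat) :
    b ≤ runMax path L b := by
  induction L generalizing b with
  | nil => simp [runMax]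
  | cons q t ih =>
      simp only [runMax, List.foldl_cons]
      split_ifs with h
      · exact le_trans (le_max_left _ _) (ih (max b q.2.toList.length))
      · exact ih b

theorem runMax_attained (path : String) (L : List (String × String)) (b : Nat)
    (h : runMax path L b ≠ b) :
    ∃ p ∈ L, PySem.Str.startswith path p.2 = true ∧ p.2.toList.length = runMax path L b := by
  induction L generalizing b with
  | nil => simp [runMax] at h
  | cons q t ih =>
      simp only [runMax, List.foldl_cons] at h ⊢
      split_ifs at h ⊢ with hsw
      · by_cases h2 : runMax path t (max b q.2.toList.length) = max b q.2.toList.length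
        · refine ⟨q, by simp, hsw, ?_⟩
          rw [runMax] at h2
          rw [h2] at h ⊢
          omega
        · obtain ⟨p, hp, hsw', hlen⟩ := ih (max b q.2.toList.length) h2
          exact ⟨p, List.mem_cons_of_mem _ hp, hsw', hlen⟩
      · obtain ⟨p, hp, hsw', hlen⟩ := ih b h
        exact ⟨p, List.mem_cons_of_mem _ hp, hsw', hlen⟩

-- A's accumulation loop computes the first pair attaining the overall maximum (if it improves on the seed)
theorem foldA_eq (path : String) (L : List (String × String)) (bc bh : String) :
    L.foldl (fun (st : String × String) (p : String × String) =>
        if PySem.Str.startswith path p.2 && decide (st.1.toList.length < p.2.toList.length)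
        then (p.2, p.1) else st) (bc, bh)
    = (match L.find? (fun p => PySem.Str.startswith path p.2
            && decide (bc.toList.length < p.2.toList.length)
            && (p.2.toList.length == runMax path L bc.toList.length)) with
       | some p => (p.2, p.1)
       | none => (bc, bh)) := by
  induction L generalizing bc bh with
  | nil => rfl
  | cons q t ih =>
    have hrM : runMax path (q :: t) bc.toList.length
        = runMax path t (if PySem.Str.startswith path q.2 then max bc.toList.length q.2.toList.length else bc.toList.length) := rfl
    rw [List.foldl_cons, List.find?_cons, hrM]
    cases hsw : PySem.Str.startswith path q.2 with
    | false =>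
        simp only [hsw, Bool.false_and, Bool.and_self, if_false, Bool.false_eq_true, ite_false]
        exact ih bc bh
    | true =>
        cases hlt : decide (bc.toList.length < q.2.toList.length) with
        | false =>
            have hmax : max bc.toList.length q.2.toList.length = bc.toList.length := by
              have := of_decide_eq_false hlt; omega
            simp only [hsw, hlt, Bool.true_and, Bool.false_and, Bool.and_false, if_true, hmax,
              Bool.false_eq_true, ite_false]
            exact ih bc bh
        | true =>
            have hblt : bc.toList.length < q.2.toList.length := of_decide_eq_true hlt
            have hmax : max bc.toList.length q.2.toList.length = q.2.toList.length := by omega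
            simp only [hsw, hlt, Bool.true_and, if_true, hmax]
            by_cases he : q.2.toList.length = runMax path t q.2.toList.length
            · have hq : (q.2.toList.length == runMax path t q.2.toList.length) = true := by
                simp only [beq_iff_eq]; exact he
              simp only [hq, ite_true]
              rw [ih q.2 q.1]
              have hnone : t.find? (fun p => PySem.Str.startswith path p.2
                  && decide (q.2.toList.length < p.2.toList.length)
                  && (p.2.toList.length == runMax path t q.2.toList.length)) = none := by
                apply List.find?_eq_none.2
                intro p _
                by_cases hl : p.2.toList.length = runMax path t q.2.toList.length
                · have hd : decide (q.2.toList.length < p.2.toList.length) = false := by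
                    rw [decide_eq_false_iff_not]; omega
                  simp only [hd, Bool.and_false, Bool.false_and]
                  exact Bool.false_ne_true
                · have hb : (p.2.toList.length == runMax path t q.2.toList.length) = false := by
                    simp only [beq_eq_false_iff_ne, ne_eq]; exact hl
                  simp only [hb, Bool.and_false]
                  exact Bool.false_ne_true
              rw [hnone]
            · have hlt2 : q.2.toList.length < runMax path t q.2.toList.length := by
                have := le_runMax path t q.2.toList.length; omega
              have hq : (q.2.toList.length == runMax path t q.2.toList.length) = false := by
                simp only [beq_eq_false_iff_ne, ne_eq]; exact he
              simp only [hq, Bool.and_false, Bool.false_eq_true, ite_false]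
              rw [ih q.2 q.1]
              have hpred : (fun (p : String × String) => PySem.Str.startswith path p.2
                    && decide (bc.toList.length < p.2.toList.length)
                    && (p.2.toList.length == runMax path t q.2.toList.length))
                  = (fun p => PySem.Str.startswith path p.2
                    && decide (q.2.toList.length < p.2.toList.length)
                    && (p.2.toList.length == runMax path t q.2.toList.length)) := by
                funext p
                by_cases hl : p.2.toList.length = runMax path t q.2.toList.length
                · have h1 : decide (bc.toList.length < p.2.toList.length) = true := by
                    rw [decide_eq_true_iff]; omega
                  have h2 : decide (q.2.toList.length < p.2.toList.length) = true := by
                    rw [decide_eq_true_iff]; omega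
                  simp only [h1, h2]
                · have hb : (p.2.toList.length == runMax path t q.2.toList.length) = false := by
                    simp only [beq_eq_false_iff_ne, ne_eq]; exact hl
                  simp only [hb, Bool.and_false]
              rw [hpred]
              cases hfind : List.find? (fun p => PySem.Str.startswith path p.2
                  && decide (q.2.toList.length < p.2.toList.length)
                  && (p.2.toList.length == runMax path t q.2.toList.length)) t with
              | some p => rfl
              | none =>
                  exfalso
                  obtain ⟨p, hp, hsw', hlen⟩ :=
                    runMax_attained path t q.2.toList.length (fun h => he h.symm)
                  have hd : decide (q.2.toList.length < p.2.toList.length) = true :=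
                    decide_eq_true (by omega)
                  have hb2 : (p.2.toList.length == runMax path t q.2.toList.length) = true :=
                    beq_iff_eq.mpr hlen
                  exact (List.find?_eq_none.mp hfind p hp)
                    (by rw [hsw', hd, hb2]; rfl)

-- B's for-loop is a first-match search
theorem arAltFind_eq (path : String) (best : Int) (L : List (String × String)) :
    arAltFind path best L
    = (match L.find? (fun p => ((p.2.toList.length : Int) == best)
            && PySem.Str.startswith path p.2) with
       | some p => String.ofList (p.1.toList ++ PySem.Chars.slice path.toList (some best) none)
       | none => path) := by
  induction L with
  | nil => rfl
  | cons q t ih =>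
      cases hb : (((q.2.toList.length : Int) == best) && PySem.Str.startswith path q.2)
      · simp only [arAltFind, List.find?_cons, hb]
        simpa using ih
      · simp only [arAltFind, List.find?_cons, hb]
        simp

-- B's max(..., default=0) is the running maximum runMax _ _ 0
theorem maxD_eq_runMax (path : String) (L : List (String × String)) :
    PySem.List.maxD ((L.filter (fun p => PySem.Str.startswith path p.2)).map
        (fun p => (p.2.toList.length : Int))) (fun x => x) 0
    = (runMax path L 0 : Int) := by
  have key : ∀ (M : List (String × String)) (b : Nat),
      ((M.filter (fun p => PySem.Str.startswith path p.2)).map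
          (fun p => (p.2.toList.length : Int))).foldl max (b : Int)
        = (runMax path M b : Int) := by
    intro M
    induction M with
    | nil => intro b; rfl
    | cons q t ih =>
        intro b
        rw [List.filter_cons]
        by_cases hsw : PySem.Str.startswith path q.2 = true
        · simp only [hsw, if_true, List.map_cons, List.foldl_cons]
          have hcast : max (b : Int) (q.2.toList.length : Int)
              = ((max b q.2.toList.length : Nat) : Int) := by
            rw [Nat.cast_max]
          rw [hcast, ih (max b q.2.toList.length)]
          have : runMax path (q :: t) b = runMax path t (max b q.2.toList.length) := by
            simp only [runMax, List.foldl_cons, hsw, if_true]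
          rw [this]
        · simp only [hsw, if_false, Bool.false_eq_true]
          rw [ih b]
          have : runMax path (q :: t) b = runMax path t b := by
            simp only [runMax, List.foldl_cons, hsw, if_false, Bool.false_eq_true]
          rw [this]
  cases hns : (L.filter (fun p => PySem.Str.startswith path p.2)).map
      (fun p => (p.2.toList.length : Int)) with
  | nil =>
      have := key L 0
      rw [hns] at this
      simpa using this
  | cons x t =>
      have hx : 0 ≤ x := by
        have : x ∈ (L.filter (fun p => PySem.Str.startswith path p.2)).map
            (fun p => (p.2.toList.length : Int)) := by rw [hns]; exact List.mem_cons_self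
        obtain ⟨p, _, hp⟩ := List.mem_map.mp this
        omega
      have hfold := key L 0
      rw [hns] at hfold
      simp only [PySem.List.maxD, PySem.List.max?_id_cons, Option.getD_some]
      rw [List.foldl_cons] at hfold
      rw [show max ((0 : Nat) : Int) x = x from max_eq_right hx] at hfold
      exact hfold

-- ===== VERDICT (by name: the statement is the Claim_ definition above) =====
theorem apply_reverse_spec : Claim_equal_apply_reverse := by
  intro path mappings _
  unfold Spec_apply_reverse apply_reverse apply_reverse_alt
  set L := (PySem.Dict.ofList mappings).items with hL
  simp only []
  rw [foldA_eq path L "" "", maxD_eq_runMax path L]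
  have hnil : ("" : String).toList = [] := rfl
  simp only [hnil, List.length_nil]
  by_cases hM : runMax path L 0 = 0
  · -- no (nonempty) prefix matches: both return path
    have hfind : L.find? (fun p => PySem.Str.startswith path p.2
        && decide (0 < p.2.toList.length) && (p.2.toList.length == runMax path L 0)) = none := by
      apply List.find?_eq_none.2
      intro p _
      by_cases hl : p.2.toList.length = runMax path L 0
      · have hd : decide (0 < p.2.toList.length) = false := by
          rw [decide_eq_false_iff_not]; omega
        simp only [hd, Bool.and_false, Bool.false_and]
        exact Bool.false_ne_true
      · have hb : (p.2.toList.length == runMax path L 0) = false := by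
          simp only [beq_eq_false_iff_ne, ne_eq]; exact hl
        simp only [hb, Bool.and_false]
        exact Bool.false_ne_true
    rw [hfind, hM]
    simp
  · -- a prefix matches: both return the first entry of maximal length
    have hpred : (fun (p : String × String) => PySem.Str.startswith path p.2
          && decide (0 < p.2.toList.length) && (p.2.toList.length == runMax path L 0))
        = (fun p => ((p.2.toList.length : Int) == (runMax path L 0 : Int))
          && PySem.Str.startswith path p.2) := by
      funext p
      by_cases hl : p.2.toList.length = runMax path L 0
      · have hd : decide (0 < p.2.toList.length) = true := decide_eq_true (by omega)
        have hb1 : (p.2.toList.length == runMax path L 0) = true := beq_iff_eq.mpr hl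
        have hb2 : ((p.2.toList.length : Int) == (runMax path L 0 : Int)) = true := by
          rw [beq_iff_eq]; exact_mod_cast hl
        rw [hd, hb1, hb2]
        simp [Bool.and_comm]
      · have hb1 : (p.2.toList.length == runMax path L 0) = false := by
          simp only [beq_eq_false_iff_ne, ne_eq]; exact hl
        have hb2 : ((p.2.toList.length : Int) == (runMax path L 0 : Int)) = false := by
          simp only [beq_eq_false_iff_ne, ne_eq]
          intro h; exact hl (by exact_mod_cast h)
        rw [hb1, hb2]
        simp
    have hbne : ((runMax path L 0 : Nat) : Int) ≠ 0 := by
      intro h; exact hM (by exact_mod_cast h)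
    rw [if_neg hbne, arAltFind_eq, ← hpred]
    cases hfind : L.find? (fun p => PySem.Str.startswith path p.2
        && decide (0 < p.2.toList.length) && (p.2.toList.length == runMax path L 0)) with
    | none =>
        exfalso
        obtain ⟨p, hp, hsw', hlen⟩ := runMax_attained path L 0 hM
        have hd : decide (0 < p.2.toList.length) = true := decide_eq_true (by omega)
        have hb : (p.2.toList.length == runMax path L 0) = true := beq_iff_eq.mpr hlen
        exact (List.find?_eq_none.mp hfind p hp) (by rw [hsw', hd, hb]; rfl)
    | some p =>
        have hpr := List.find?_some hfind
        have hlen : p.2.toList.length = runMax path L 0 := by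
          have := (Bool.and_eq_true_iff.mp hpr).2
          exact beq_iff_eq.mp this
        have hne : p.2.toList ≠ [] := by
          intro h
          have : p.2.toList.length = 0 := by rw [h]; rfl
          omega
        rw [if_pos hne, hlen]
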